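-- pv_equiv track=rewrite | github.com/ravi-teja528/Sorting-Visualizer | t3.py | colorarr
-- ===== SOURCE A (Python) =====
-- def colorarr(len, left, middle, right):
--     color = []
--     for i in range(len):
--         if i >= left and i <= right:
--             if i <= middle:
--                 color.append("yellow")
--             else:
--                 color.append("pink")
--         else:
--             color.append("grey")
--
--     return color
-- ===== SOURCE B (Python) =====
-- def colorarr(len, left, middle, right):
--     n = max(len, 0)
--     color = ["grey"] * n
--     y_lo = max(left, 0)
--     y_hi = min(middle, right, n - 1)
--     if y_lo <= y_hi:
--         color[y_lo:y_hi + 1] = ["yellow"] * (y_hi + 1 - y_lo)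
--     p_lo = max(left, middle + 1, 0)
--     p_hi = min(right, n - 1)
--     if p_lo <= p_hi:
--         color[p_lo:p_hi + 1] = ["pink"] * (p_hi + 1 - p_lo)
--     return color
-- ===== Notes on version B (the rewrite author's own statement) =====
-- stated objective: simpler
-- what changed: B replaces A's per-index loop with three nested tests by block construction: a grey base list plus two clamped contiguous slice fills (yellow then pink) computed from the boundaries up front.
import Mathlib
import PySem

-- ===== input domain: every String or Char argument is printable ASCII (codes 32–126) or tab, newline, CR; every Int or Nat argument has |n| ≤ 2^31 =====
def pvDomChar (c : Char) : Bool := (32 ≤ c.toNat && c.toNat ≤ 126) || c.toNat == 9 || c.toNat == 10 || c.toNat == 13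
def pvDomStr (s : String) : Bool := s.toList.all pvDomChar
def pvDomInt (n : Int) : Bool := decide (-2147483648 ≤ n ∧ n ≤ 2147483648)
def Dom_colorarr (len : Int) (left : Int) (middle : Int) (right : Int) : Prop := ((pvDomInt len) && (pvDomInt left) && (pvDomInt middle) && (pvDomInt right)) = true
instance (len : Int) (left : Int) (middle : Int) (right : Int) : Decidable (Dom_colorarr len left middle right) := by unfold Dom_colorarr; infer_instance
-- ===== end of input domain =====

-- B replaces A's per-index branching with block construction: a grey base plus two
-- clamped contiguous slice fills (objective: simpler, no per-element tests).

-- ===== PORT A =====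
def colorarr (len : Int) (left : Int) (middle : Int) (right : Int) : List String :=
  (PySem.List.pyRange 0 len 1).foldl (fun color i =>
    color ++ [if left ≤ i ∧ i ≤ right then (if i ≤ middle then "yellow" else "pink") else "grey"]) []

-- ===== PORT B =====
-- Python slice assignment color[a:hi+1] = [v]*k (with 0 ≤ a, 0 < k, a+k ≤ len) is exactly
-- take/replicate/drop; B only calls it under the guard lo ≤ hi, i.e. 0 < k.
def pvSetRange (xs : List String) (a k : Int) (v : String) : List String :=
  xs.take a.toNat ++ List.replicate k.toNat v ++ xs.drop (a.toNat + k.toNat)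

def colorarr_alt (len : Int) (left : Int) (middle : Int) (right : Int) : List String :=
  let n := max len 0
  let color := List.replicate n.toNat "grey"
  let yLo := max left 0
  let yHi := min middle (min right (n - 1))
  let color := if yLo ≤ yHi then pvSetRange color yLo (yHi + 1 - yLo) "yellow" else color
  let pLo := max left (max (middle + 1) 0)
  let pHi := min right (n - 1)
  if pLo ≤ pHi then pvSetRange color pLo (pHi + 1 - pLo) "pink" else color

-- ===== PRECONDITION & SPEC =====
def Spec_colorarr (len : Int) (left : Int) (middle : Int) (right : Int) (out : List String) : Prop := out = colorarr_alt len left middle right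
instance (len : Int) (left : Int) (middle : Int) (right : Int) (out : List String) : Decidable (Spec_colorarr len left middle right out) := by unfold Spec_colorarr; infer_instance

-- ===== CLAIM (what is proved, stated in full; the proofs are below) =====
def Claim_equal_colorarr : Prop := ∀ (len : Int) (left : Int) (middle : Int) (right : Int), Dom_colorarr len left middle right → Spec_colorarr len left middle right (colorarr len left middle right)

-- ===== LEMMAS AND PROOFS =====

-- A unrolled: element i of the result is A's branch at index i.
theorem colorarr_eq_map (len left middle right : Int) :
    colorarr len left middle right
      = (List.range len.toNat).map (fun (i : Nat) =>
          if left ≤ (i : Int) ∧ (i : Int) ≤ right then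
            (if (i : Int) ≤ middle then "yellow" else "pink") else "grey") := by
  simp only [colorarr, PySem.List.pyRange_one, List.foldl_map,
    PySem.List.foldl_append_singleton_eq_map, List.nil_append, sub_zero, zero_add]

-- slice fill on a mapped range: pointwise description.
theorem pvSetRange_map_range (n : Nat) (f : Nat → String) (a k : Int) (v : String)
    (ha : 0 ≤ a) (hk : 0 < k) (hak : a + k ≤ (n : Int)) :
    pvSetRange ((List.range n).map f) a k v
      = (List.range n).map (fun (i : Nat) =>
          if a ≤ (i : Int) ∧ (i : Int) < a + k then v else f i) := by
  apply List.ext_getElem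
  · simp only [pvSetRange, List.length_append, List.length_take, List.length_replicate,
      List.length_drop, List.length_map, List.length_range]
    omega
  · intro i h1 h2
    simp only [pvSetRange, List.length_append, List.length_take, List.length_replicate,
      List.length_drop, List.length_map, List.length_range] at h1 h2 ⊢
    simp only [List.getElem_append, List.getElem_take, List.getElem_drop,
      List.getElem_replicate, List.length_take, List.length_replicate, List.length_append,
      List.length_map, List.length_range, List.getElem_map, List.getElem_range]
    split_ifs <;> first | rfl | omega | (congr 1; omega)

theorem colorarr_spec_core (len left middle right : Int) :
    colorarr len left middle right = colorarr_alt len left middle right := by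
  rw [colorarr_eq_map]
  have hrep : List.replicate (max len 0).toNat "grey"
      = (List.range len.toNat).map (fun _ : Nat => "grey") := by
    rw [List.map_const', List.length_range]
    congr 1
    omega
  simp only [colorarr_alt, hrep]
  by_cases hy : max left 0 ≤ min middle (min right (max len 0 - 1)) <;>
  by_cases hp : max left (max (middle + 1) 0) ≤ min right (max len 0 - 1) <;>
    simp only [hy, hp, if_pos, if_neg, not_false_iff] <;>
    [skip; skip; skip; skip] <;>
    first
    | (rw [pvSetRange_map_range _ _ _ _ _ (by omega) (by omega) (by omega),
           pvSetRange_map_range _ _ _ _ _ (by omega) (by omega) (by omega)]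
       apply List.map_congr_left; intro i hi; rw [List.mem_range] at hi
       split_ifs <;> (try rfl) <;> omega)
    | (rw [pvSetRange_map_range _ _ _ _ _ (by omega) (by omega) (by omega)]
       apply List.map_congr_left; intro i hi; rw [List.mem_range] at hi
       split_ifs <;> (try rfl) <;> omega)
    | (apply List.map_congr_left; intro i hi; rw [List.mem_range] at hi
       split_ifs <;> (try rfl) <;> omega)

-- ===== VERDICT (by name: the statement is the Claim_ definition above) =====
theorem colorarr_spec : Claim_equal_colorarr := by
  intro len left middle right _
  exact colorarr_spec_core len left middle right
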